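-- pv_equiv track=rewrite | github.com/omeriyibas/prep-test-app | Utils/dbUtils.py | filter_db
-- ===== SOURCE A (Python) =====
-- def filter_db(db, feature):
--     cols = list(feature.keys())
--     values = list(feature.values())
--
--     users = db
--
--     for i in range(0, len(values)):
--         if values[i] != "":
--             users = [user for user in users if user[cols[i]] == values[i]]
--
--     return users
-- ===== SOURCE B (Python) =====
-- def filter_db(db, feature):
--     # One pass over db with an explicit accumulator; each user is checked by a
--     # recursive conjunction over the precomputed active constraints.
--     active = [kv for kv in feature.items() if kv[1] != ""]
--
--     def keep(user, cs):
--         if not cs: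
--             return True
--         (k, v) = cs[0]
--         return user[k] == v and keep(user, cs[1:])
--
--     out = []
--     for user in db:
--         if keep(user, active):
--             out.append(user)
--     return out
-- ===== Notes on version B (the rewrite author's own statement) =====
-- stated objective: alternative
-- what changed: Replaces A's sequence of m filter passes over a shrinking user list (one per non-empty feature) with a single accumulator pass over db in which each user is tested by a recursive conjunction over the precomputed active constraints.
import Mathlib
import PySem

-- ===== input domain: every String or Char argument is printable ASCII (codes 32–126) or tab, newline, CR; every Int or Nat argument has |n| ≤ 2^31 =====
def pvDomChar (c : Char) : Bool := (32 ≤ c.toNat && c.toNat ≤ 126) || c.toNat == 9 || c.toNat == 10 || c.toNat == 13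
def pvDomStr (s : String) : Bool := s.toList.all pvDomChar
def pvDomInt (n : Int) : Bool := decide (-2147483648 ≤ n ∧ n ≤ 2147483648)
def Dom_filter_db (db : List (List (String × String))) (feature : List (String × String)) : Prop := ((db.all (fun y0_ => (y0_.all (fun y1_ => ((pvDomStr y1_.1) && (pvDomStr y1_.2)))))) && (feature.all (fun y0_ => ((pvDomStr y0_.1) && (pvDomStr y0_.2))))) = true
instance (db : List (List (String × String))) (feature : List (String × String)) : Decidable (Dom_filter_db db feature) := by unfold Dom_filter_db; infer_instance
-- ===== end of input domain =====

-- B replaces A's chain of per-feature filter passes with a single accumulator pass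
-- over db, testing each user by a recursive conjunction over the active constraints
-- (objective: alternative, same cost).


-- ===== PORT A =====
-- user[k] (dict lookup, first match) ported as List.lookup; inside Pre_ the key is
-- always present at the moment Python performs the lookup, so the `.getD ""` default
-- is never the decisive value there.
def filter_db (db : List (List (String × String))) (feature : List (String × String)) : List (List (String × String)) :=
  let cols := feature.map Prod.fst
  let values := feature.map Prod.snd
  (List.range values.length).foldl
    (fun users i =>
      if values.getD i "" ≠ "" then
        users.filter (fun user => (List.lookup (cols.getD i "") user).getD "" == values.getD i "")
      else users)
    db

-- ===== PORT B =====
-- `keep user cs`: recursive conjunction over the remaining constraints.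
def pvKeep (user : List (String × String)) : List (String × String) → Bool
  | [] => true
  | kv :: rest => ((List.lookup kv.1 user).getD "" == kv.2) && pvKeep user rest

-- the explicit accumulator pass over db (output built in order)
def pvPass (active : List (String × String)) : List (List (String × String)) → List (List (String × String))
  | [] => []
  | user :: rest =>
    if pvKeep user active then user :: pvPass active rest else pvPass active rest

def filter_db_alt (db : List (List (String × String))) (feature : List (String × String)) : List (List (String × String)) :=
  pvPass (feature.filter (fun kv => kv.2 ≠ "")) db

-- ===== PRECONDITION & SPEC =====
-- Pre_ excludes exactly the inputs on which the Python A raises KeyError: some user,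
-- having matched every earlier non-empty feature, lacks the key of a later non-empty
-- feature (B raises KeyError there too).  Stated in closed form: for every user and
-- every index i into the active (non-empty-valued) features, if the user matches all
-- earlier active features then the i-th active key occurs among the user's keys.
def Pre_filter_db (db : List (List (String × String))) (feature : List (String × String)) : Prop :=
  ∀ user ∈ db, ∀ i < (feature.filter (fun kv => kv.2 ≠ "")).length,
    (∀ j < i, List.lookup ((feature.filter (fun kv => kv.2 ≠ "")).getD j ("", "")).1 user
        = some ((feature.filter (fun kv => kv.2 ≠ "")).getD j ("", "")).2) →
    ((feature.filter (fun kv => kv.2 ≠ "")).getD i ("", "")).1 ∈ user.map Prod.fst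
instance (db : List (List (String × String))) (feature : List (String × String)) : Decidable (Pre_filter_db db feature) := by unfold Pre_filter_db; infer_instance

def pvWitness_filter_db : (List (List (String × String))) × (List (String × String)) :=
  ([[("a", "1"), ("b", "2")], [("a", "2")]], [("a", "1"), ("b", "")])

def Spec_filter_db (db : List (List (String × String))) (feature : List (String × String)) (out : List (List (String × String))) : Prop := out = filter_db_alt db feature
instance (db : List (List (String × String))) (feature : List (String × String)) (out : List (List (String × String))) : Decidable (Spec_filter_db db feature out) := by unfold Spec_filter_db; infer_instance

-- ===== CLAIM (what is proved, stated in full; the proofs are below) =====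
def Claim_equal_filter_db : Prop := ∀ (db : List (List (String × String))) (feature : List (String × String)), Dom_filter_db db feature → Pre_filter_db db feature → Spec_filter_db db feature (filter_db db feature)

-- ===== LEMMAS AND PROOFS =====

-- B's accumulator pass is the filter by the recursive per-user check.
theorem pvPass_eq_filter (active : List (String × String)) (us : List (List (String × String))) :
    pvPass active us = us.filter (fun u => pvKeep u active) := by
  induction us with
  | nil => rfl
  | cons u us ih => simp [pvPass, ih, List.filter_cons]

-- B's recursive per-user check is the conjunction over the active constraints.
theorem pvKeep_eq_all (user : List (String × String)) (cs : List (String × String)) :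
    pvKeep user cs = cs.all (fun kv => (List.lookup kv.1 user).getD "" == kv.2) := by
  induction cs with
  | nil => rfl
  | cons kv cs ih => simp [pvKeep, ih, List.all_cons]

-- A's chain of per-constraint filter passes equals one filter by the conjunction of
-- the active constraints.  (Holds for every input; Pre_ is only about where the
-- Python A returns at all.)
theorem filter_db_fold_eq (fs : List (String × String)) (us : List (List (String × String))) :
    (List.range (fs.map Prod.snd).length).foldl
      (fun users i =>
        if (fs.map Prod.snd).getD i "" ≠ "" then
          users.filter (fun user =>
            (List.lookup ((fs.map Prod.fst).getD i "") user).getD "" == (fs.map Prod.snd).getD i "")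
        else users)
      us
    = us.filter (fun user =>
        (fs.filter (fun kv => kv.2 ≠ "")).all
          (fun kv => (List.lookup kv.1 user).getD "" == kv.2)) := by
  induction fs generalizing us with
  | nil => simp
  | cons kv fs ih =>
    simp only [List.map_cons, List.length_cons, List.range_succ_eq_map,
      List.foldl_cons, List.foldl_map, List.getD_cons_succ, List.getD_cons_zero]
    rw [ih]
    by_cases h : kv.2 = ""
    · simp [h]
    · simp [h, List.filter_filter, Bool.and_comm]

-- ===== VERDICT (by name: the statement is the Claim_ definition above) =====
theorem filter_db_spec : Claim_equal_filter_db := by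
  intro db feature _dom _pre
  unfold Spec_filter_db filter_db filter_db_alt
  rw [pvPass_eq_filter]
  simp only [pvKeep_eq_all]
  exact filter_db_fold_eq feature db
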